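-- pv_equiv track=rewrite | github.com/AldoLunaBueno/Algorithmic_Thinking | 7_binary_search/quality_of_living/algorithms/bisection_plus_dinamic.py | can_make_quality
-- ===== SOURCE A (Python) =====
-- from typing import List, Callable
--
-- Matrix = List[List[int]]
--
-- def can_make_quality(quality: int, r: int, c: int, h: int, w: int, q: Matrix):
--     q_ones = [[-1 if q_value <= quality else 1
--                for q_value in row] for row in q]
--     acc_q_ones = prefix_sum_2d(r, c, q_ones)
--     for i in range(r-h+1):
--         for j in range(c-w+1):
--             if rectangle_ones(i, j, h, w, acc_q_ones) < 0:
--                 return True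
--     return False
--
-- def prefix_sum_2d(r: int, c: int, matrix: Matrix) -> Matrix:
--     acc: Matrix = [[0]*c for _ in range(r)]
--     for i in range(r):
--         for j in range(c):
--             if i > 0 and j > 0: # in general
--                 acc[i][j] = matrix[i][j] + acc[i][j-1] + acc[i-1][j] - acc[i-1][j-1]
--             elif i == 0 and j != 0: # first row
--                 acc[0][j] = matrix[0][j] + acc[0][j-1]
--             elif j == 0 and i != 0: # first col
--                 acc[i][0] = matrix[i][0] + acc[i-1][0]
--             elif i == 0 and j == 0: # first element of matrix
--                 acc[i][j] = matrix[i][j]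
--     return acc
--
-- def rectangle_ones(top_row: int, left_col: int, h: int, w: int, acc: Matrix):
--     bottom_row = top_row + h - 1
--     right_col = left_col + w - 1
--     if top_row > 0 and left_col > 0:
--         return (acc[bottom_row][right_col]
--                 - acc[bottom_row][left_col-1]
--                 - acc[top_row-1][right_col]
--                 + acc[top_row-1][left_col-1])
--     elif top_row == 0 and left_col > 0:
--         return acc[bottom_row][right_col] - acc[bottom_row][left_col-1]
--     elif top_row > 0 and left_col == 0:
--         return acc[bottom_row][right_col] - acc[top_row-1][right_col]
--     elif top_row == 0 and left_col == 0:
--         return acc[bottom_row][right_col]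
-- ===== SOURCE B (Python) =====
-- def can_make_quality(quality, r, c, h, w, q):
--     for i in range(r - h + 1):
--         for j in range(c - w + 1):
--             ones = sum(-1 if q[i + a][j + b] <= quality else 1
--                        for a in range(h) for b in range(w))
--             if ones < 0:
--                 return True
--     return False
-- ===== Notes on version B (the rewrite author's own statement) =====
-- stated objective: simpler
-- what changed: B drops A's 2D prefix-sum table (prefix_sum_2d and the four-branch rectangle_ones corner analysis) and instead sums each h×w window directly with one comprehension.
-- outside the precondition, e.g. on can_make_quality(0, 1, 1, 0, 1, [[0]]): A returns True, B returns False
import Mathlib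
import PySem

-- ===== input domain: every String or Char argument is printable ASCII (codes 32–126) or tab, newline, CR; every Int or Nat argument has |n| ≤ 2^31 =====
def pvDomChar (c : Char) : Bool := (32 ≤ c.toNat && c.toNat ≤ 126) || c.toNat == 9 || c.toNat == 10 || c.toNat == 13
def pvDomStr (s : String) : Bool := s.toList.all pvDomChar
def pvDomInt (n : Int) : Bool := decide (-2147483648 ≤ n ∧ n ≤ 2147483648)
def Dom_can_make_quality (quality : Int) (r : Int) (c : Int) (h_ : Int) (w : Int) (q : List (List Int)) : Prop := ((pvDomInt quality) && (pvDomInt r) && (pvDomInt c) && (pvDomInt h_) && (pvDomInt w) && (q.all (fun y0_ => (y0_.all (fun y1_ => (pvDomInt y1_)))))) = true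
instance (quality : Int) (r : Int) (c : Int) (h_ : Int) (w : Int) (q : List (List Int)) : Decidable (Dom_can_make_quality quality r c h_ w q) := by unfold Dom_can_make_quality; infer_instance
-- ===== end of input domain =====

-- B replaces A's 2D prefix-sum table (prefix_sum_2d + rectangle_ones) with a direct
-- summation of each h×w window: simpler (no auxiliary table, no corner case analysis),
-- not faster. Equivalence of the return value is proved on Pre_ below.

-- ===== PORT A =====
-- acc[i][j] read (indices are in range on every executed access under Pre_)
def pvMget (m : List (List Int)) (i j : Int) : Int :=
  PySem.List.pyGetD (PySem.List.pyGetD m i []) j 0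
-- acc[i][j] = v write (i, j ≥ 0 and in range on every executed write)
def pvMset (m : List (List Int)) (i j : Int) (v : Int) : List (List Int) :=
  m.set i.toNat ((m.getD i.toNat []).set j.toNat v)

-- [[-1 if q_value <= quality else 1 for q_value in row] for row in q]
def pvQOnes (quality : Int) (q : List (List Int)) : List (List Int) :=
  q.map (fun row => row.map (fun v => if v ≤ quality then (-1 : Int) else 1))

-- body of prefix_sum_2d's inner loop (the four branches, in source order)
def pvPSInner (matrix : List (List Int)) (i : Int) (acc : List (List Int)) (j : Int) :
    List (List Int) :=
  if 0 < i ∧ 0 < j then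
    pvMset acc i j (pvMget matrix i j + pvMget acc i (j-1) + pvMget acc (i-1) j -
      pvMget acc (i-1) (j-1))
  else if i = 0 ∧ j ≠ 0 then
    pvMset acc 0 j (pvMget matrix 0 j + pvMget acc 0 (j-1))
  else if j = 0 ∧ i ≠ 0 then
    pvMset acc i 0 (pvMget matrix i 0 + pvMget acc (i-1) 0)
  else if i = 0 ∧ j = 0 then
    pvMset acc i j (pvMget matrix i j)
  else acc

def pvPrefixSum2d (r c : Int) (matrix : List (List Int)) : List (List Int) :=
  (PySem.List.pyRange 0 r 1).foldl
    (fun acc i => (PySem.List.pyRange 0 c 1).foldl (pvPSInner matrix i) acc)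
    ((PySem.List.pyRange 0 r 1).map (fun _ => List.replicate c.toNat (0 : Int)))

-- rectangle_ones; the final `else 0` is Python's implicit None fall-through, never
-- reached for the loop indices top, left ≥ 0
def pvRectangleOnes (top left h w : Int) (acc : List (List Int)) : Int :=
  let bottom := top + h - 1
  let right := left + w - 1
  if 0 < top ∧ 0 < left then
    pvMget acc bottom right - pvMget acc bottom (left-1) - pvMget acc (top-1) right +
      pvMget acc (top-1) (left-1)
  else if top = 0 ∧ 0 < left then
    pvMget acc bottom right - pvMget acc bottom (left-1)
  else if 0 < top ∧ left = 0 then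
    pvMget acc bottom right - pvMget acc (top-1) right
  else if top = 0 ∧ left = 0 then
    pvMget acc bottom right
  else 0

def can_make_quality (quality : Int) (r : Int) (c : Int) (h_ : Int) (w : Int)
    (q : List (List Int)) : Bool :=
  let acc_q_ones := pvPrefixSum2d r c (pvQOnes quality q)
  (PySem.List.pyRange 0 (r - h_ + 1) 1).any (fun i =>
    (PySem.List.pyRange 0 (c - w + 1) 1).any (fun j =>
      pvRectangleOnes i j h_ w acc_q_ones < 0))

-- ===== PORT B =====
def can_make_quality_alt (quality : Int) (r : Int) (c : Int) (h_ : Int) (w : Int)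
    (q : List (List Int)) : Bool :=
  (PySem.List.pyRange 0 (r - h_ + 1) 1).any (fun i =>
    (PySem.List.pyRange 0 (c - w + 1) 1).any (fun j =>
      ((PySem.List.pyRange 0 h_ 1).foldl (fun s a =>
        (PySem.List.pyRange 0 w 1).foldl (fun s b =>
          s + (if pvMget q (i + a) (j + b) ≤ quality then (-1 : Int) else 1)) s) 0) < 0))

-- ===== PRECONDITION & SPEC =====
-- Pre_ excludes non-positive window dimensions h ≤ 0 / w ≤ 0 when the window loops
-- actually run (outside the task's natural domain: A's negative-index wraparound yields
-- accidental values or an IndexError there), and grid descriptors whose r×c region does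
-- not fit inside q while the prefix-table loops run (there A raises IndexError).
def Pre_can_make_quality (quality : Int) (r : Int) (c : Int) (h_ : Int) (w : Int)
    (q : List (List Int)) : Prop :=
  (0 < r → 0 < c →
      r ≤ (q.length : Int) ∧ ∀ row ∈ q.take r.toNat, c ≤ (row.length : Int)) ∧
    (r - h_ + 1 ≤ 0 ∨ c - w + 1 ≤ 0 ∨ (1 ≤ h_ ∧ 1 ≤ w))
instance (quality : Int) (r : Int) (c : Int) (h_ : Int) (w : Int) (q : List (List Int)) : Decidable (Pre_can_make_quality quality r c h_ w q) := by unfold Pre_can_make_quality; infer_instance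

def pvWitness_can_make_quality : Int × Int × Int × Int × Int × List (List Int) :=
  (0, 2, 2, 1, 1, [[0, 1], [1, 0]])

def Spec_can_make_quality (quality : Int) (r : Int) (c : Int) (h_ : Int) (w : Int) (q : List (List Int)) (out : Bool) : Prop := out = can_make_quality_alt quality r c h_ w q
instance (quality : Int) (r : Int) (c : Int) (h_ : Int) (w : Int) (q : List (List Int)) (out : Bool) : Decidable (Spec_can_make_quality quality r c h_ w q out) := by unfold Spec_can_make_quality; infer_instance

-- ===== CLAIM (what is proved, stated in full; the proofs are below) =====
def Claim_equal_can_make_quality : Prop := ∀ (quality : Int) (r : Int) (c : Int) (h_ : Int) (w : Int) (q : List (List Int)), Dom_can_make_quality quality r c h_ w q → Pre_can_make_quality quality r c h_ w q → Spec_can_make_quality quality r c h_ w q (can_make_quality quality r c h_ w q)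

-- ===== LEMMAS AND PROOFS =====

-- the ±1 cell value and its 2D prefix sums (exclusive bounds)
def pvG (quality : Int) (q : List (List Int)) (a b : Nat) : Int :=
  if pvMget q (a : Int) (b : Int) ≤ quality then -1 else 1

def pvS (quality : Int) (q : List (List Int)) (i j : Nat) : Int :=
  ∑ a ∈ Finset.range i, ∑ b ∈ Finset.range j, pvG quality q a b

-- fully computed prefix row a, and the matrix states of the fill loop
def pvFrow (qu : Int) (q : List (List Int)) (cN a : Nat) : List Int :=
  (List.range cN).map (fun b => pvS qu q (a+1) (b+1))

def pvStAt (qu : Int) (q : List (List Int)) (rN cN i j : Nat) : List (List Int) :=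
  ((List.range i).map (pvFrow qu q cN)) ++
    [((List.range j).map (fun b => pvS qu q (i+1) (b+1))) ++ List.replicate (cN - j) 0] ++
    List.replicate (rN - i - 1) (List.replicate cN 0)

def pvStFull (qu : Int) (q : List (List Int)) (rN cN i : Nat) : List (List Int) :=
  ((List.range i).map (pvFrow qu q cN)) ++ List.replicate (rN - i) (List.replicate cN 0)

lemma pvS_zero_left (qu : Int) (q : List (List Int)) (j : Nat) : pvS qu q 0 j = 0 := by
  simp [pvS]

lemma pvS_zero_right (qu : Int) (q : List (List Int)) (i : Nat) : pvS qu q i 0 = 0 := by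
  simp [pvS]

lemma pvS_succ_succ (qu : Int) (q : List (List Int)) (i j : Nat) :
    pvS qu q (i+1) (j+1) = pvS qu q (i+1) j + pvS qu q i (j+1) - pvS qu q i j +
      pvG qu q i j := by
  simp [pvS, Finset.sum_range_succ, Finset.sum_add_distrib]; ring


lemma pvW_eq (qu : Int) (q : List (List Int)) (i j h w : Nat) :
    (∑ a ∈ Finset.range h, ∑ b ∈ Finset.range w, pvG qu q (i+a) (j+b)) =
      pvS qu q (i+h) (j+w) - pvS qu q (i+h) j - pvS qu q i (j+w) + pvS qu q i j := by
  have key : ∀ jj : Nat, pvS qu q (i+h) jj - pvS qu q i jj =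
      ∑ a ∈ Finset.range h, ∑ b ∈ Finset.range jj, pvG qu q (i+a) b := by
    intro jj
    rw [pvS, pvS, ← Finset.sum_Ico_eq_sub _ (Nat.le_add_right i h),
      Finset.sum_Ico_eq_sum_range]
    simp
  have inner : ∀ a : Nat, (∑ b ∈ Finset.range (j+w), pvG qu q (i+a) b) -
      (∑ b ∈ Finset.range j, pvG qu q (i+a) b) = ∑ b ∈ Finset.range w, pvG qu q (i+a) (j+b) := by
    intro a
    rw [← Finset.sum_Ico_eq_sub _ (Nat.le_add_right j w), Finset.sum_Ico_eq_sum_range]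
    simp
  calc (∑ a ∈ Finset.range h, ∑ b ∈ Finset.range w, pvG qu q (i+a) (j+b))
      = ∑ a ∈ Finset.range h, ((∑ b ∈ Finset.range (j+w), pvG qu q (i+a) b) -
          (∑ b ∈ Finset.range j, pvG qu q (i+a) b)) := by
        exact Finset.sum_congr rfl (fun a _ => (inner a).symm)
    _ = (pvS qu q (i+h) (j+w) - pvS qu q i (j+w)) - (pvS qu q (i+h) j - pvS qu q i j) := by
        rw [Finset.sum_sub_distrib, ← key (j+w), ← key j]
    _ = _ := by ring


-- reads on the intermediate state
lemma pvStAt_get_cur (qu : Int) (q : List (List Int)) (rN cN i j : Nat) (_hi : i < rN) :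
    (pvStAt qu q rN cN i j).getD i [] =
      ((List.range j).map (fun b => pvS qu q (i+1) (b+1))) ++ List.replicate (cN - j) 0 := by
  simp [pvStAt, List.getD_eq_getElem?_getD]


lemma pvStAt_get_prev (qu : Int) (q : List (List Int)) (rN cN i j a : Nat) (ha : a < i) :
    (pvStAt qu q rN cN i j).getD a [] = pvFrow qu q cN a := by
  simp [pvStAt, List.getD_eq_getElem?_getD, List.getElem?_append_left, ha, pvFrow]


lemma pvMget_stAt_cur (qu : Int) (q : List (List Int)) (rN cN i j b : Nat) (hi : i < rN)
    (hb : b < j) :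
    pvMget (pvStAt qu q rN cN i j) (i : Int) (b : Int) = pvS qu q (i+1) (b+1) := by
  rw [pvMget, PySem.List.pyGetD_natCast, PySem.List.pyGetD_natCast,
    pvStAt_get_cur qu q rN cN i j hi,
    List.getD_append _ _ _ _ (by simpa using hb)]
  simp [List.getD_eq_getElem?_getD, hb]


lemma pvMget_stAt_prev (qu : Int) (q : List (List Int)) (rN cN i j a b : Nat) (ha : a < i)
    (hb : b < cN) :
    pvMget (pvStAt qu q rN cN i j) (a : Int) (b : Int) = pvS qu q (a+1) (b+1) := by
  rw [pvMget, PySem.List.pyGetD_natCast, PySem.List.pyGetD_natCast,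
    pvStAt_get_prev qu q rN cN i j a ha]
  simp [pvFrow, List.getD_eq_getElem?_getD, hb]


lemma pvSet_row (f : Nat → Int) (j m : Nat) (h : j < m) :
    (((List.range j).map f) ++ List.replicate (m - j) 0).set j (f j) =
      ((List.range (j+1)).map f) ++ List.replicate (m - (j+1)) 0 := by
  apply List.ext_getElem
  · simp; omega
  · intro k hk1 hk2
    simp only [List.getElem_set]
    by_cases hkj : j = k
    · subst hkj
      rw [if_pos rfl, List.getElem_append_left (by simp)]
      simp
    · rw [if_neg hkj]
      have hkm : k < m := by simp at hk2; omega
      by_cases hklt : k < j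
      · rw [List.getElem_append_left (by simpa), List.getElem_append_left (by simp; omega)]
        simp
      · rw [List.getElem_append_right (by simp; omega), List.getElem_append_right (by simp; omega)]
        simp


lemma pvStAt_set (qu : Int) (q : List (List Int)) (rN cN i j : Nat) (hi : i < rN)
    (hj : j < cN) :
    pvMset (pvStAt qu q rN cN i j) (i : Int) (j : Int) (pvS qu q (i+1) (j+1)) =
      pvStAt qu q rN cN i (j+1) := by
  rw [pvMset]
  simp only [Int.toNat_natCast]
  rw [pvStAt_get_cur qu q rN cN i j hi]
  rw [pvSet_row (fun b => pvS qu q (i+1) (b+1)) j cN hj]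
  show (pvStAt qu q rN cN i j).set i _ = _
  rw [pvStAt, pvStAt, List.append_assoc,
    List.set_append, if_neg (by simp), List.append_assoc]
  simp


lemma pvStep_eq (qu : Int) (q M : List (List Int)) (rN cN i j : Nat) (hi : i < rN)
    (hj : j < cN) (hM : ∀ a b : Nat, a < rN → b < cN → pvMget M (a : Int) (b : Int) = pvG qu q a b) :
    pvPSInner M (i : Int) (pvStAt qu q rN cN i j) (j : Int) = pvStAt qu q rN cN i (j+1) := by
  have hcur : j ≠ 0 → pvMget (pvStAt qu q rN cN i j) (i : Int) ((j : Int) - 1) =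
      pvS qu q (i+1) j := by
    intro hj0
    rw [show ((j : Int) - 1) = ((j - 1 : Nat) : Int) by omega,
      pvMget_stAt_cur qu q rN cN i j (j-1) hi (by omega), show j - 1 + 1 = j by omega]
  have hprev : ∀ j' : Nat, i ≠ 0 → j' < cN →
      pvMget (pvStAt qu q rN cN i j) ((i : Int) - 1) (j' : Int) = pvS qu q i (j'+1) := by
    intro j' hi0 hj'
    rw [show ((i : Int) - 1) = ((i - 1 : Nat) : Int) by omega,
      pvMget_stAt_prev qu q rN cN i j (i-1) j' (by omega) hj', show i - 1 + 1 = i by omega]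
  have hMij := hM i j hi hj
  have hset := pvStAt_set qu q rN cN i j hi hj
  rw [pvPSInner]
  by_cases hi0 : i = 0 <;> by_cases hj0 : j = 0
  · subst hi0; subst hj0
    rw [if_neg (by simp), if_neg (by simp), if_neg (by simp), if_pos (by simp)]
    simp only [Nat.cast_zero] at hMij hset ⊢
    rw [hMij, show pvG qu q 0 0 = pvS qu q 1 1 by simp [pvS]]
    exact hset
  · subst hi0
    rw [if_neg (by simp), if_pos (by simpa using hj0)]
    simp only [Nat.cast_zero] at hMij hcur hset ⊢
    rw [hMij, hcur hj0]
    have hv := pvS_succ_succ qu q 0 j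
    norm_num [pvS_zero_left] at hv
    rw [show pvG qu q 0 j + pvS qu q 1 j = pvS qu q 1 (j+1) by omega]
    exact hset
  · subst hj0
    rw [if_neg (by simp), if_neg (by simp), if_pos (by simpa using hi0)]
    have hp0 := hprev 0 hi0 hj
    simp only [Nat.cast_zero] at hMij hp0 hset ⊢
    rw [hMij, hp0]
    have hv := pvS_succ_succ qu q i 0
    norm_num [pvS_zero_right] at hv
    rw [show pvG qu q i 0 + pvS qu q i 1 = pvS qu q (i+1) 1 by omega]
    exact hset
  · rw [if_pos ⟨by simpa using Nat.pos_of_ne_zero hi0, by simpa using Nat.pos_of_ne_zero hj0⟩]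
    rw [hMij, hcur hj0, hprev j hi0 hj,
      show ((j : Int) - 1) = ((j - 1 : Nat) : Int) by omega,
      hprev (j-1) hi0 (by omega), show j - 1 + 1 = j by omega]
    have hv := pvS_succ_succ qu q i j
    rw [show pvG qu q i j + pvS qu q (i+1) j + pvS qu q i (j+1) - pvS qu q i j =
      pvS qu q (i+1) (j+1) by omega]
    exact hset

lemma pvInner_fold (qu : Int) (q M : List (List Int)) (rN cN i : Nat) (hi : i < rN)
    (hM : ∀ a b : Nat, a < rN → b < cN → pvMget M (a : Int) (b : Int) = pvG qu q a b) :
    ∀ j ≤ cN, (List.range j).foldl (fun st (k : Nat) => pvPSInner M (i : Int) st (k : Int))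
        (pvStAt qu q rN cN i 0) = pvStAt qu q rN cN i j := by
  intro j
  induction j with
  | zero => simp
  | succ j ih =>
    intro hj
    rw [List.range_succ, List.foldl_append, ih (by omega)]
    exact pvStep_eq qu q M rN cN i j hi (by omega) hM

lemma pvStFull_eq_stAt_zero (qu : Int) (q : List (List Int)) (rN cN i : Nat) (hi : i < rN) :
    pvStFull qu q rN cN i = pvStAt qu q rN cN i 0 := by
  rw [pvStFull, pvStAt, show rN - i = (rN - i - 1) + 1 by omega, List.replicate_succ]
  simp


lemma pvStAt_last_eq_stFull (qu : Int) (q : List (List Int)) (rN cN i : Nat) :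
    pvStAt qu q rN cN i cN = pvStFull qu q rN cN (i+1) := by
  simp [pvStAt, pvStFull, List.range_succ, pvFrow, Nat.sub_sub]


lemma pvOuter_fold (qu : Int) (q M : List (List Int)) (rN cN : Nat)
    (hM : ∀ a b : Nat, a < rN → b < cN → pvMget M (a : Int) (b : Int) = pvG qu q a b) :
    ∀ i ≤ rN, (List.range i).foldl
        (fun acc (k : Nat) => (List.range cN).foldl (fun st (k' : Nat) => pvPSInner M (k : Int) st (k' : Int)) acc)
        (pvStFull qu q rN cN 0) = pvStFull qu q rN cN i := by
  intro i
  induction i with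
  | zero => simp
  | succ i ih =>
    intro hi
    rw [List.range_succ, List.foldl_append, ih (by omega)]
    show (List.range cN).foldl (fun st (k' : Nat) => pvPSInner M (i : Int) st (k' : Int))
        (pvStFull qu q rN cN i) = _
    rw [pvStFull_eq_stAt_zero qu q rN cN i (by omega),
      pvInner_fold qu q M rN cN i (by omega) hM cN (le_refl cN),
      pvStAt_last_eq_stFull]

lemma pvPrefix_eq (qu : Int) (q M : List (List Int)) (r c : Int) (hr : 0 ≤ r) (hc : 0 ≤ c)
    (hM : ∀ a b : Nat, a < r.toNat → b < c.toNat → pvMget M (a : Int) (b : Int) = pvG qu q a b) :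
    pvPrefixSum2d r c M = pvStFull qu q r.toNat c.toNat r.toNat := by
  rw [pvPrefixSum2d,
    show r = ((r.toNat : Nat) : Int) by omega, show c = ((c.toNat : Nat) : Int) by omega]
  simp only [Int.toNat_natCast, PySem.List.pyRange_zero_natCast, List.foldl_map]
  rw [show List.map (fun _ => List.replicate c.toNat (0 : Int))
      (List.map (fun k => ((k : Nat) : Int)) (List.range r.toNat)) =
      pvStFull qu q r.toNat c.toNat 0 from by
    simp [List.map_map, Function.comp_def, List.map_const', pvStFull]]
  exact pvOuter_fold qu q M r.toNat c.toNat hM r.toNat (le_refl _)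

lemma pvMget_full (qu : Int) (q : List (List Int)) (rN cN a b : Nat) (ha : a < rN)
    (hb : b < cN) :
    pvMget (pvStFull qu q rN cN rN) (a : Int) (b : Int) = pvS qu q (a+1) (b+1) := by
  rw [pvMget, PySem.List.pyGetD_natCast, PySem.List.pyGetD_natCast, pvStFull]
  simp only [Nat.sub_self, List.replicate_zero, List.append_nil]
  rw [PySem.List.getD_map_range _ _ _ _ ha, pvFrow, PySem.List.getD_map_range _ _ _ _ hb]


lemma pvRect_eq (qu : Int) (q : List (List Int)) (rN cN hN wN i j : Nat) (hh : 1 ≤ hN)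
    (hw : 1 ≤ wN) (hir : i + hN ≤ rN) (hjc : j + wN ≤ cN) :
    pvRectangleOnes (i : Int) (j : Int) (hN : Int) (wN : Int) (pvStFull qu q rN cN rN) =
      ∑ a ∈ Finset.range hN, ∑ b ∈ Finset.range wN, pvG qu q (i+a) (j+b) := by
  rw [pvRectangleOnes, pvW_eq]
  by_cases hi0 : i = 0 <;> by_cases hj0 : j = 0
  · subst hi0; subst hj0
    rw [if_neg (by simp), if_neg (by simp), if_neg (by simp), if_pos (by simp)]
    simp only [Nat.cast_zero, zero_add]
    rw [show ((hN : Int) - 1) = ((hN - 1 : Nat) : Int) by omega,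
      show ((wN : Int) - 1) = ((wN - 1 : Nat) : Int) by omega,
      pvMget_full qu q rN cN (hN-1) (wN-1) (by omega) (by omega),
      show hN - 1 + 1 = hN by omega, show wN - 1 + 1 = wN by omega]
    simp [pvS_zero_left, pvS_zero_right]
  · subst hi0
    rw [if_neg (by simp), if_pos ⟨by simp, by simpa using Nat.pos_of_ne_zero hj0⟩]
    simp only [Nat.cast_zero, zero_add]
    rw [show ((hN : Int) - 1) = ((hN - 1 : Nat) : Int) by omega,
      show ((j : Int) + (wN : Int) - 1) = ((j + wN - 1 : Nat) : Int) by omega,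
      show ((j : Int) - 1) = ((j - 1 : Nat) : Int) by omega,
      pvMget_full qu q rN cN (hN-1) (j+wN-1) (by omega) (by omega),
      pvMget_full qu q rN cN (hN-1) (j-1) (by omega) (by omega),
      show hN - 1 + 1 = hN by omega, show j + wN - 1 + 1 = j + wN by omega,
      show j - 1 + 1 = j by omega]
    simp only [pvS_zero_left]
    omega
  · subst hj0
    rw [if_neg (by simp), if_neg (by simp),
      if_pos ⟨by simpa using Nat.pos_of_ne_zero hi0, by simp⟩]
    simp only [Nat.cast_zero, zero_add]
    rw [show ((i : Int) + (hN : Int) - 1) = ((i + hN - 1 : Nat) : Int) by omega,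
      show ((wN : Int) - 1) = ((wN - 1 : Nat) : Int) by omega,
      show ((i : Int) - 1) = ((i - 1 : Nat) : Int) by omega,
      pvMget_full qu q rN cN (i+hN-1) (wN-1) (by omega) (by omega),
      pvMget_full qu q rN cN (i-1) (wN-1) (by omega) (by omega),
      show i + hN - 1 + 1 = i + hN by omega, show wN - 1 + 1 = wN by omega,
      show i - 1 + 1 = i by omega]
    simp only [pvS_zero_right]
    omega
  · rw [if_pos ⟨by simpa using Nat.pos_of_ne_zero hi0, by simpa using Nat.pos_of_ne_zero hj0⟩]
    rw [show ((i : Int) + (hN : Int) - 1) = ((i + hN - 1 : Nat) : Int) by omega,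
      show ((j : Int) + (wN : Int) - 1) = ((j + wN - 1 : Nat) : Int) by omega,
      show ((i : Int) - 1) = ((i - 1 : Nat) : Int) by omega,
      show ((j : Int) - 1) = ((j - 1 : Nat) : Int) by omega,
      pvMget_full qu q rN cN (i+hN-1) (j+wN-1) (by omega) (by omega),
      pvMget_full qu q rN cN (i+hN-1) (j-1) (by omega) (by omega),
      pvMget_full qu q rN cN (i-1) (j+wN-1) (by omega) (by omega),
      pvMget_full qu q rN cN (i-1) (j-1) (by omega) (by omega),
      show i + hN - 1 + 1 = i + hN by omega, show j + wN - 1 + 1 = j + wN by omega,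
      show i - 1 + 1 = i by omega, show j - 1 + 1 = j by omega]


lemma pvBsum_eq (qu : Int) (q : List (List Int)) (hN wN iN jN : Nat) :
    ((PySem.List.pyRange 0 (hN : Int) 1).foldl (fun s a =>
        (PySem.List.pyRange 0 (wN : Int) 1).foldl (fun s b =>
          s + (if pvMget q ((iN : Int) + a) ((jN : Int) + b) ≤ qu then (-1 : Int) else 1)) s) 0) =
      ∑ a ∈ Finset.range hN, ∑ b ∈ Finset.range wN, pvG qu q (iN+a) (jN+b) := by
  have hsum : ∀ n : Nat, ∀ f : Nat → Int,
      ((List.range n).map f).sum = ∑ a ∈ Finset.range n, f a := fun n f => rfl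
  simp only [PySem.List.foldl_add, PySem.List.pyRange_zero_natCast, List.map_map, zero_add]
  rw [hsum]
  apply Finset.sum_congr rfl
  intro a _
  simp only [Function.comp_apply]
  rw [hsum]
  apply Finset.sum_congr rfl
  intro b _
  simp only [Function.comp_apply, pvG]
  push_cast
  rfl

lemma pvQOnes_get (qu : Int) (q : List (List Int)) (rN cN a b : Nat)
    (hlen : rN ≤ q.length) (hrow : ∀ row ∈ q.take rN, cN ≤ row.length)
    (ha : a < rN) (hb : b < cN) :
    pvMget (pvQOnes qu q) (a : Int) (b : Int) = pvG qu q a b := by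
  have haq : a < q.length := lt_of_lt_of_le ha hlen
  have hmem : q[a] ∈ q.take rN := by
    have h1 : a < (q.take rN).length := by simp [haq]; omega
    have h2 : (q.take rN)[a] = q[a] := List.getElem_take
    rw [← h2]
    exact List.getElem_mem h1
  have hbrow : b < q[a].length := lt_of_lt_of_le hb (hrow _ hmem)
  have hrowA : PySem.List.pyGetD (pvQOnes qu q) (a : Int) [] =
      (q[a]).map (fun v => if v ≤ qu then (-1 : Int) else 1) := by
    rw [pvQOnes, PySem.List.pyGetD_eq_getElem _ _ (by omega) (by simpa using haq)]
    simp
  have hrowQ : PySem.List.pyGetD q (a : Int) [] = q[a] := by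
    rw [PySem.List.pyGetD_eq_getElem _ _ (by omega) (by simpa using haq)]
    simp
  rw [pvMget, pvG, pvMget, hrowA, hrowQ,
    PySem.List.pyGetD_eq_getElem _ _ (by omega) (by simpa using hbrow),
    PySem.List.pyGetD_eq_getElem _ _ (by omega) (by simpa using hbrow)]
  simp

-- ===== VERDICT (by name: the statement is the Claim_ definition above) =====
theorem can_make_quality_spec : Claim_equal_can_make_quality := by
  intro quality r c h_ w q _dom hpre
  obtain ⟨hshape, hd⟩ := hpre
  unfold Spec_can_make_quality
  simp only [can_make_quality, can_make_quality_alt]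
  by_cases hr : r - h_ + 1 ≤ 0
  · simp [PySem.List.pyRange_one_eq_nil hr]
  · by_cases hcw : c - w + 1 ≤ 0
    · simp [PySem.List.pyRange_one_eq_nil hcw]
    · rw [not_le] at hr hcw
      obtain ⟨hh, hw⟩ : 1 ≤ h_ ∧ 1 ≤ w := by
        rcases hd with hd | hd | hd
        · omega
        · omega
        · exact hd
      have hr0 : 0 < r := by omega
      have hc0 : 0 < c := by omega
      obtain ⟨hlen, hrow⟩ := hshape hr0 hc0
      have hM : ∀ a b : Nat, a < r.toNat → b < c.toNat →
          pvMget (pvQOnes quality q) (a : Int) (b : Int) = pvG quality q a b := by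
        intro a b ha hb
        exact pvQOnes_get quality q r.toNat c.toNat a b (by omega)
          (fun row hm => by have := hrow row hm; omega) ha hb
      rw [pvPrefix_eq quality q _ r c (by omega) (by omega) hM]
      apply PySem.List.any_congr_mem
      intro i hi
      rw [PySem.List.mem_pyRange_one] at hi
      apply PySem.List.any_congr_mem
      intro j hj
      rw [PySem.List.mem_pyRange_one] at hj
      rw [show i = ((i.toNat : Nat) : Int) by omega, show j = ((j.toNat : Nat) : Int) by omega,
        show h_ = ((h_.toNat : Nat) : Int) by omega, show w = ((w.toNat : Nat) : Int) by omega,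
        pvRect_eq quality q r.toNat c.toNat h_.toNat w.toNat i.toNat j.toNat (by omega) (by omega)
          (by omega) (by omega),
        pvBsum_eq quality q h_.toNat w.toNat i.toNat j.toNat]
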